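-- pv_equiv track=rewrite | github.com/CptCookie/AOC | Python/Year2025/Day6/solution.py | parse_part_2
-- ===== SOURCE A (Python) =====
-- Problem = list[str]
--
-- def parse_part_2(aoc_input: str) -> list[Problem]:
--     lines = [list(line) for line in aoc_input.splitlines()]
--     transformed_problems = []
--     problem = []
--
--     while True:
--         try:
--             col = [line.pop(0) for line in lines]
--             op = col.pop()
--             num = "".join(col).strip()
--             if num == "" and op == " " and problem:
--                 transformed_problems.append(problem)
--                 problem = []
--                 continue
--
--             if op != " ":
--                 problem.append(op)
--                 # operation marks the begining of a new problem
--
--             problem.append(num)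
--         except IndexError:
--             transformed_problems.append(problem)
--             return [
--                 list(reversed(problem))
--                 for problem in transformed_problems
--                 if problem != []
--             ]
-- ===== SOURCE B (Python) =====
-- def parse_part_2(aoc_input: str) -> list:
--     lines = [list(line) for line in aoc_input.splitlines()]
--     cols = list(zip(*lines))
--     # Pass 1: a column separates two problems iff it is all blank and is neither the first
--     # column nor directly behind another separator (every other column contributes its number).
--     flags = []
--     prev_sep = True
--     for col in cols:
--         sep = (not prev_sep) and col[-1] == " " and "".join(col[:-1]).strip() == ""
--         flags.append(sep)
--         prev_sep = sep
--     # Pass 2: walk the columns right to left, so every problem is emitted already reversed.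
--     problems = []
--     problem = []
--     for col, sep in reversed(list(zip(cols, flags))):
--         if sep:
--             problems.append(problem)
--             problem = []
--         else:
--             problem.append("".join(col[:-1]).strip())
--             op = col[-1]
--             if op != " ":
--                 problem.append(op)
--     problems.append(problem)
--     problems.reverse()
--     return [p for p in problems if p]
-- ===== Notes on version B (the rewrite author's own statement) =====
-- stated objective: faster
-- what changed: B replaces A's destructive per-column pop(0) loop with exception-driven exit and final per-problem reversal by a zip(*lines) transpose, a forward pass marking separator columns, and a right-to-left pass that emits each problem already reversed.
import Mathlib
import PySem

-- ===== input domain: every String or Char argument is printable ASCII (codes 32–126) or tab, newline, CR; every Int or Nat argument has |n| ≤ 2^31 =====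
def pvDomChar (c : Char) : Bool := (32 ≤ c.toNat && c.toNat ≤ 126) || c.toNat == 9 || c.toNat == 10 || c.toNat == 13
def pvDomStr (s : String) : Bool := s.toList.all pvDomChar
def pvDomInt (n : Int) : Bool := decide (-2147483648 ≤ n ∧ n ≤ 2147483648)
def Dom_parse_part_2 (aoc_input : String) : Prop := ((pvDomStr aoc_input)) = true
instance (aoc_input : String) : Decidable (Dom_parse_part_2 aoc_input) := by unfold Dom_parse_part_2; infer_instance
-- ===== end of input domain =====

-- B replaces A's destructive pop(0)/exception loop by a zip(*lines) transpose, a forward pass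
-- marking separator columns, and a right-to-left pass that emits each problem already reversed.

-- ===== PORT A =====
-- A's while/try loop: pop the head of every line (IndexError = some line exhausted, or no lines),
-- op is the popped column's last char, num the stripped join of the rest.  The fuel parameter is a
-- pure totality guard: each iteration strictly shrinks the total number of characters, and the
-- wrapper supplies more fuel than that total, so fuel is never exhausted.
def pvALoop (fuel : Nat) (lines : List (List Char)) (tp : List (List String))
    (problem : List String) : List (List String) :=
  match fuel with
  | 0 => []
  | fuel + 1 =>
    if lines.isEmpty || lines.any List.isEmpty then
      -- except IndexError: append problem, filter non-empty, reverse each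
      ((tp ++ [problem]).filter (fun p => p ≠ [])).map List.reverse
    else
      let col := lines.map (fun l => l.headD ' ')
      let rest := lines.map (fun l => l.tail)
      let op := col.getLastD ' '
      let num := String.ofList (PySem.Chars.strip col.dropLast)
      if num = "" ∧ op = ' ' ∧ problem ≠ [] then
        pvALoop fuel rest (tp ++ [problem]) []
      else
        pvALoop fuel rest tp (problem ++ (if op ≠ ' ' then [String.ofList [op]] else []) ++ [num])

def parse_part_2 (aoc_input : String) : List (List String) :=
  let lines := (PySem.Str.splitlines aoc_input).map String.toList
  pvALoop ((lines.map List.length).sum + 1) lines [] []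

-- ===== PORT B =====
-- zip(*lines): truncating transpose (fuel is the same pure totality guard)
def pvZipStar (fuel : Nat) (lines : List (List Char)) : List (List Char) :=
  match fuel with
  | 0 => []
  | fuel + 1 =>
    if lines.isEmpty || lines.any List.isEmpty then []
    else lines.map (fun l => l.headD ' ') :: pvZipStar fuel (lines.map (fun l => l.tail))

-- pass 1 of Source B: the separator flag of each column
def pvFlags (cols : List (List Char)) (prevSep : Bool) : List Bool :=
  match cols with
  | [] => []
  | c :: cs =>
    let sep := !prevSep && (c.getLastD ' ' == ' ') &&
      (String.ofList (PySem.Chars.strip c.dropLast) == "")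
    sep :: pvFlags cs sep

-- loop body of pass 2 of Source B (the right-to-left walk)
def pvBackStep (st : List (List String) × List String) (p : List Char × Bool) :
    List (List String) × List String :=
  if p.2 then
    (st.1 ++ [st.2], [])
  else
    let num := String.ofList (PySem.Chars.strip p.1.dropLast)
    let op := p.1.getLastD ' '
    (st.1, st.2 ++ [num] ++ (if op ≠ ' ' then [String.ofList [op]] else []))

def parse_part_2_alt (aoc_input : String) : List (List String) :=
  let lines := (PySem.Str.splitlines aoc_input).map String.toList
  let cols := pvZipStar ((lines.map List.length).sum + 1) lines
  let flags := pvFlags cols true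
  let st := ((cols.zip flags).reverse).foldl pvBackStep ([], [])
  ((st.1 ++ [st.2]).reverse).filter (fun p => p ≠ [])

-- ===== PRECONDITION & SPEC =====
def Spec_parse_part_2 (aoc_input : String) (out : List (List String)) : Prop := out = parse_part_2_alt aoc_input
instance (aoc_input : String) (out : List (List String)) : Decidable (Spec_parse_part_2 aoc_input out) := by unfold Spec_parse_part_2; infer_instance

-- ===== CLAIM (what is proved, stated in full; the proofs are below) =====
def Claim_equal_parse_part_2 : Prop := ∀ (aoc_input : String), Dom_parse_part_2 aoc_input → Spec_parse_part_2 aoc_input (parse_part_2 aoc_input)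

-- ===== LEMMAS AND PROOFS =====

theorem pvTailsSumLt : ∀ (lines : List (List Char)), lines ≠ [] → (∀ l ∈ lines, l ≠ []) →
    ((lines.map (fun l => l.tail)).map List.length).sum < (lines.map List.length).sum := by
  intro lines hne hall
  induction lines with
  | nil => exact absurd rfl hne
  | cons a rest ih =>
    simp only [List.map_cons, List.sum_cons]
    have ha : a ≠ [] := hall a (by simp)
    have h1 : a.tail.length < a.length := by
      cases a with
      | nil => exact absurd rfl ha
      | cons x xs => simp
    have h2 : ((rest.map (fun l => l.tail)).map List.length).sum ≤ (rest.map List.length).sum := by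
      clear ih hall hne
      induction rest with
      | nil => simp
      | cons b bs ih2 =>
        simp only [List.map_cons, List.sum_cons]
        have : b.tail.length ≤ b.length := by cases b <;> simp
        omega
    omega

theorem pvFilterMapReverse (l : List (List String)) :
    ((l.map List.reverse).filter (fun p => p ≠ [])) =
      ((l.filter (fun p => p ≠ [])).map List.reverse) := by
  rw [List.filter_map]
  congr 1
  apply List.filter_congr
  intro p _
  simp

-- proof-side restatement of A's loop body on a column list, with the problem kept reversed
def pvBStep (st : List (List String) × List String) (column : List Char) :
    List (List String) × List String :=
  let op := column.getLastD ' '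
  let num := String.ofList (PySem.Chars.strip column.dropLast)
  if num = "" ∧ op = ' ' ∧ st.2 ≠ [] then
    (st.1 ++ [st.2], [])
  else
    (st.1, [num] ++ (if op ≠ ' ' then [String.ofList [op]] else []) ++ st.2)

-- the abstract grouping both programs compute (problems kept reversed, built front to back)
def pvGRec (cols : List (List Char)) (cur : List String) : List (List String) :=
  match cols with
  | [] => [cur]
  | c :: cs =>
    let op := c.getLastD ' '
    let num := String.ofList (PySem.Chars.strip c.dropLast)
    if num = "" ∧ op = ' ' ∧ cur ≠ [] then cur :: pvGRec cs []
    else pvGRec cs ([num] ++ (if op ≠ ' ' then [String.ofList [op]] else []) ++ cur)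

-- A's loop equals the forward fold over the transpose, relating A's state to the reversed state.
theorem pvLoopEq (fuel : Nat) (lines : List (List Char)) (tp : List (List String))
    (problem : List String) (hf : (lines.map List.length).sum < fuel) :
    pvALoop fuel lines tp problem =
      (((pvZipStar fuel lines).foldl pvBStep (tp.map List.reverse, problem.reverse)).1 ++
        [((pvZipStar fuel lines).foldl pvBStep (tp.map List.reverse, problem.reverse)).2]).filter
        (fun g => g ≠ []) := by
  induction fuel generalizing lines tp problem with
  | zero => omega
  | succ fuel ih =>
    rw [pvALoop, pvZipStar]
    by_cases hterm : (lines.isEmpty || lines.any List.isEmpty) = true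
    · simp only [hterm, if_pos, List.foldl_nil]
      have hmk : (tp.map List.reverse ++ [problem.reverse]) = (tp ++ [problem]).map List.reverse := by
        simp
      rw [hmk, pvFilterMapReverse]
    · simp only [hterm, if_neg, Bool.not_eq_true, List.foldl_cons]
      have hlt : (((lines.map (fun l => l.tail)).map List.length).sum) < fuel := by
        have hne : lines ≠ [] := by
          simp only [Bool.or_eq_true, List.isEmpty_iff] at hterm
          tauto
        have hall : ∀ l ∈ lines, l ≠ [] := by
          intro l hl
          simp only [Bool.or_eq_true, List.any_eq_true, List.isEmpty_iff] at hterm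
          push Not at hterm
          exact hterm.2 l hl
        have := pvTailsSumLt lines hne hall
        omega
      by_cases hcond : (String.ofList (PySem.Chars.strip
            ((lines.map (fun l => l.headD ' ')).dropLast)) = "" ∧
          (lines.map (fun l => l.headD ' ')).getLastD ' ' = ' ' ∧ problem ≠ [])
      · rw [if_pos hcond]
        have hstep : pvBStep (tp.map List.reverse, problem.reverse)
            (lines.map (fun l => l.headD ' ')) =
            ((tp ++ [problem]).map List.reverse, ([] : List String).reverse) := by
          simp only [pvBStep]
          rw [if_pos]
          · simp
          · exact ⟨hcond.1, hcond.2.1, by simpa using hcond.2.2⟩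
        rw [hstep]
        exact ih _ _ _ hlt
      · rw [if_neg hcond]
        have hstep : pvBStep (tp.map List.reverse, problem.reverse)
            (lines.map (fun l => l.headD ' ')) =
            (tp.map List.reverse,
              (problem ++
                (if (lines.map (fun l => l.headD ' ')).getLastD ' ' ≠ ' ' then
                  [String.ofList [(lines.map (fun l => l.headD ' ')).getLastD ' ']] else []) ++
                [String.ofList (PySem.Chars.strip
                  ((lines.map (fun l => l.headD ' ')).dropLast))]).reverse) := by
          simp only [pvBStep]
          rw [if_neg]
          · simp only [List.reverse_append]
            congr 1
            · split <;> simp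
          · intro hc
            exact hcond ⟨hc.1, hc.2.1, by simpa using hc.2.2⟩
        rw [hstep]
        exact ih _ _ _ hlt

-- the forward fold flattens to the abstract grouping
theorem pvFoldGRec (cols : List (List Char)) (G : List (List String)) (C : List String) :
    (cols.foldl pvBStep (G, C)).1 ++ [(cols.foldl pvBStep (G, C)).2] = G ++ pvGRec cols C := by
  induction cols generalizing G C with
  | nil => simp [pvGRec]
  | cons c cs ih =>
    simp only [List.foldl_cons]
    rw [pvGRec]
    by_cases hcond : (String.ofList (PySem.Chars.strip c.dropLast) = "" ∧
        c.getLastD ' ' = ' ' ∧ C ≠ [])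
    · have : pvBStep (G, C) c = (G ++ [C], []) := by
        simp only [pvBStep]
        rw [if_pos hcond]
      rw [this, if_pos hcond, ih]
      simp
    · have : pvBStep (G, C) c =
          (G, [String.ofList (PySem.Chars.strip c.dropLast)] ++
            (if c.getLastD ' ' ≠ ' ' then [String.ofList [c.getLastD ' ']] else []) ++ C) := by
        simp only [pvBStep]
        rw [if_neg hcond]
      rw [this, if_neg hcond, ih]

-- the abstract grouping equals B's backward pass over the flagged columns
theorem pvGRecBack (cols : List (List Char)) (cur : List String) :
    pvGRec cols cur =
      ((((cols.zip (pvFlags cols cur.isEmpty)).reverse).foldl pvBackStep ([], [])).1 ++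
        [(((cols.zip (pvFlags cols cur.isEmpty)).reverse).foldl pvBackStep ([], [])).2 ++
          cur]).reverse := by
  induction cols generalizing cur with
  | nil => simp [pvGRec, pvFlags]
  | cons c cs ih =>
    rw [pvGRec, pvFlags]
    simp only [List.zip_cons_cons, List.reverse_cons, List.foldl_append, List.foldl_cons,
      List.foldl_nil]
    by_cases hcond : (String.ofList (PySem.Chars.strip c.dropLast) = "" ∧
        c.getLastD ' ' = ' ' ∧ cur ≠ [])
    · have hflag : (!cur.isEmpty && (c.getLastD ' ' == ' ') &&
          (String.ofList (PySem.Chars.strip c.dropLast) == "")) = true := by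
        simp only [Bool.and_eq_true, Bool.not_eq_eq_eq_not, Bool.not_true, beq_iff_eq,
          List.isEmpty_eq_false_iff]
        exact ⟨⟨hcond.2.2, hcond.2.1⟩, hcond.1⟩
      rw [if_pos hcond, hflag]
      have hstep : ∀ st : List (List String) × List String,
          pvBackStep st (c, true) = (st.1 ++ [st.2], []) := by
        intro st
        simp [pvBackStep]
      rw [hstep, ih]
      simp
    · have hflag : (!cur.isEmpty && (c.getLastD ' ' == ' ') &&
          (String.ofList (PySem.Chars.strip c.dropLast) == "")) = false := by
        by_contra hne
        have := eq_true_of_ne_false hne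
        simp only [Bool.and_eq_true, Bool.not_eq_eq_eq_not, Bool.not_true, beq_iff_eq,
          List.isEmpty_eq_false_iff] at this
        exact hcond ⟨this.2, this.1.2, this.1.1⟩
      rw [if_neg hcond, hflag]
      have hstep : ∀ st : List (List String) × List String,
          pvBackStep st (c, false) =
            (st.1, st.2 ++ [String.ofList (PySem.Chars.strip c.dropLast)] ++
              (if c.getLastD ' ' ≠ ' ' then [String.ofList [c.getLastD ' ']] else [])) := by
        intro st
        simp [pvBackStep]
      rw [hstep]
      have hcur : (([String.ofList (PySem.Chars.strip c.dropLast)] ++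
          (if c.getLastD ' ' ≠ ' ' then [String.ofList [c.getLastD ' ']] else []) ++
          cur).isEmpty) = false := by
        simp
      rw [ih, hcur]
      simp

-- ===== VERDICT (by name: the statement is the Claim_ definition above) =====
theorem parse_part_2_spec : Claim_equal_parse_part_2 := by
  intro aoc_input _
  unfold Spec_parse_part_2 parse_part_2 parse_part_2_alt
  have h1 := pvLoopEq _ ((PySem.Str.splitlines aoc_input).map String.toList) [] []
    (Nat.lt_succ_self _)
  simp only [List.map_nil, List.reverse_nil] at h1
  rw [h1, pvFoldGRec, pvGRecBack]
  simp
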